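-- pv_equiv track=rewrite | github.com/Ronchy2000/Python_Study | 数据结构与算法/华为机试准备/2025.4.23考试/4.23.1.1.py | find_nearest_light_point
-- ===== SOURCE A (Python) =====
-- def find_nearest_light_point(img, width, height, target, num_target):
--     center_point_row = (height - 1) // 2
--     center_point_col = (width - 1) // 2
--
--     # directions = [(0,1),(1,0),(0,-1),(-1,0)] # 模仿grid world中的动作，离散动作。
--     #
--     # row,col = center_point_row, center_point_col
--     # found_count = 0 #找够了就不找了。
--     #
--     # steps = 1 # 0
--     # current_dir = 0 #不同的动作
--     # point_visited = set((row,col)) #集合数组都行。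
--
--     found_target = []
--     for row in range(height):
--         for col in range(width):
--             if img[row][col] == target:
--                 # 计算曼哈顿距离
--                 distance = abs(row - center_point_row) + abs(col - center_point_col)
--                 # 添加点(距离, x坐标, y坐标)
--                 found_target.append((distance, col, row))
--
--     # 按距离从小到大排序，距离相同时按x从小到大排序，x相同时按y从小到大排序
--     found_target.sort()
--
--     return found_target[:num_target]
-- ===== SOURCE B (Python) =====
-- def find_nearest_light_point(img, width, height, target, num_target):
--     center_row = (height - 1) // 2
--     center_col = (width - 1) // 2
--     pts = []
--     for row in range(height):
--         for col in range(width):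
--             if img[row][col] == target:
--                 pts.append((abs(row - center_row) + abs(col - center_col), col, row))
--     result = []
--     for d in sorted(set(p[0] for p in pts)):
--         for c, r in sorted((p[1], p[2]) for p in pts if p[0] == d):
--             result.append((d, c, r))
--     return result[:num_target]
-- ===== Notes on version B (the rewrite author's own statement) =====
-- stated objective: alternative
-- what changed: Instead of one global sort of (distance, col, row) triples, B groups matching points by Manhattan distance: it walks the distinct distances in increasing order and, for each, sorts only that distance's (col, row) pairs and appends them, then slices the assembled list.
import Mathlib
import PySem

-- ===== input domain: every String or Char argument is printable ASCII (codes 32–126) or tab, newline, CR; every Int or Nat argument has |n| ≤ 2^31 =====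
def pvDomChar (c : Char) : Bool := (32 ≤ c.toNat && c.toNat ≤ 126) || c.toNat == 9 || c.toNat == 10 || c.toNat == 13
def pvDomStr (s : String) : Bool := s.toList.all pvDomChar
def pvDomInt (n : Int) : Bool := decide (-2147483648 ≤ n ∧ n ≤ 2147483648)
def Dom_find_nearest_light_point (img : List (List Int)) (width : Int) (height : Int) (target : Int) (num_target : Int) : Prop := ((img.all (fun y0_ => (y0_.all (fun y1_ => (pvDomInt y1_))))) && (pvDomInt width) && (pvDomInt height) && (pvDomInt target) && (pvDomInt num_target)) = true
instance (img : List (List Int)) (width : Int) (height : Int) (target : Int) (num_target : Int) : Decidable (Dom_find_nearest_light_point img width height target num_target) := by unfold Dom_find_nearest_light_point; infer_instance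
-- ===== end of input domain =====

-- B replaces A's single lexicographic sort of all (distance, col, row) triples by a grouped sort:
-- distinct distances in increasing order, each distance's (col, row) pairs sorted separately (objective: alternative decomposition).

-- ===== PORT A =====
-- the lexicographic key of Python's tuple comparison on (distance, col, row)
def pvLexKey (t : Int × Int × Int) : Lex (Int × Lex (Int × Int)) := toLex (t.1, toLex (t.2.1, t.2.2))

def find_nearest_light_point (img : List (List Int)) (width : Int) (height : Int) (target : Int) (num_target : Int) : List (Int × Int × Int) :=
  let center_point_row := PySem.Int.floordiv (height - 1) 2
  let center_point_col := PySem.Int.floordiv (width - 1) 2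
  let found_target := (PySem.List.pyRange 0 height 1).foldl (fun acc row =>
    (PySem.List.pyRange 0 width 1).foldl (fun acc col =>
      if PySem.List.pyGetD (PySem.List.pyGetD img row []) col 0 == target then
        acc ++ [(|row - center_point_row| + |col - center_point_col|, col, row)]
      else acc) acc) []
  -- found_target.sort() sorts tuples lexicographically: PySem.List.sorted with the lex key
  PySem.List.slice (PySem.List.sorted found_target pvLexKey) none (some num_target)

-- ===== PORT B =====
def find_nearest_light_point_alt (img : List (List Int)) (width : Int) (height : Int) (target : Int) (num_target : Int) : List (Int × Int × Int) :=
  let center_row := PySem.Int.floordiv (height - 1) 2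
  let center_col := PySem.Int.floordiv (width - 1) 2
  let pts := (PySem.List.pyRange 0 height 1).foldl (fun acc row =>
    (PySem.List.pyRange 0 width 1).foldl (fun acc col =>
      if PySem.List.pyGetD (PySem.List.pyGetD img row []) col 0 == target then
        acc ++ [(|row - center_row| + |col - center_col|, col, row)]
      else acc) acc) []
  let result := (PySem.List.sorted (PySem.Set.ofList (pts.map (fun p => p.1))) (fun x => x)).foldl
    (fun res d =>
      (PySem.List.sorted2 ((pts.filter (fun p => p.1 == d)).map (fun p => (p.2.1, p.2.2)))
          (fun p => p.1) (fun p => p.2)).foldl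
        (fun res p => res ++ [(d, p.1, p.2)]) res) []
  PySem.List.slice result none (some num_target)

-- ===== PRECONDITION & SPEC =====
-- Pre_ excludes exactly the inputs where Python A raises IndexError: a positive width with
-- fewer than `height` rows, or some scanned row shorter than `width`.
def Pre_find_nearest_light_point (img : List (List Int)) (width : Int) (height : Int) (target : Int) (num_target : Int) : Prop :=
  width ≤ 0 ∨ (height ≤ (img.length : Int) ∧ ∀ r ∈ img.take height.toNat, width ≤ (r.length : Int))
instance (img : List (List Int)) (width : Int) (height : Int) (target : Int) (num_target : Int) : Decidable (Pre_find_nearest_light_point img width height target num_target) := by unfold Pre_find_nearest_light_point; infer_instance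
def pvWitness_find_nearest_light_point : List (List Int) × Int × Int × Int × Int := ([[1, 0], [0, 1]], 2, 2, 1, 3)

def Spec_find_nearest_light_point (img : List (List Int)) (width : Int) (height : Int) (target : Int) (num_target : Int) (out : List (Int × Int × Int)) : Prop := out = find_nearest_light_point_alt img width height target num_target
instance (img : List (List Int)) (width : Int) (height : Int) (target : Int) (num_target : Int) (out : List (Int × Int × Int)) : Decidable (Spec_find_nearest_light_point img width height target num_target out) := by unfold Spec_find_nearest_light_point; infer_instance

-- ===== CLAIM (what is proved, stated in full; the proofs are below) =====
def Claim_equal_find_nearest_light_point : Prop := ∀ (img : List (List Int)) (width : Int) (height : Int) (target : Int) (num_target : Int), Dom_find_nearest_light_point img width height target num_target → Pre_find_nearest_light_point img width height target num_target → Spec_find_nearest_light_point img width height target num_target (find_nearest_light_point img width height target num_target)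

-- ===== LEMMAS AND PROOFS =====

theorem pvLexKey_injective : Function.Injective pvLexKey := by
  rintro ⟨a1, a2, a3⟩ ⟨b1, b2, b3⟩ h
  have h1 := toLex.injective h
  rw [Prod.mk.injEq] at h1
  have h2 := toLex.injective h1.2
  rw [Prod.mk.injEq] at h2
  exact Prod.ext h1.1 (Prod.ext h2.1 h2.2)

-- Python compares pairs lexicographically: sorted2's comparator is the Lex-key comparator
theorem sorted2_eq_sorted_toLex {α : Type} (xs : List α) (k1 k2 : α → Int) :
    PySem.List.sorted2 xs k1 k2 = PySem.List.sorted xs (fun x => toLex (k1 x, k2 x)) := by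
  rw [PySem.List.sorted_eq_foldl_insertBy]
  have hmain : PySem.List.sorted2 xs k1 k2 = xs.foldl (fun acc x => PySem.List.insertBy
      (fun a b => decide (k1 a < k1 b) || !decide (k1 b < k1 a) && decide (k2 a < k2 b)) x acc) [] := rfl
  rw [hmain]
  congr 1
  funext acc x
  congr 1
  funext a b
  rcases lt_trichotomy (k1 a) (k1 b) with h | h | h
  · simp [h, Prod.Lex.lt_iff, asymm h]
  · simp [h, Prod.Lex.lt_iff]
  · simp [Prod.Lex.lt_iff, asymm h, h, ne_of_gt h]

theorem flatMap_congr_mem {α β : Type} {l : List α} {f g : α → List β}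
    (h : ∀ x ∈ l, f x = g x) : l.flatMap f = l.flatMap g := by
  induction l with
  | nil => rfl
  | cons a t ih =>
    simp only [List.flatMap_cons, h a (by simp), ih fun x hx => h x (by simp [hx])]

theorem flatMap_perm_congr {α β : Type} {l : List α} {f g : α → List β}
    (h : ∀ x ∈ l, (f x).Perm (g x)) : (l.flatMap f).Perm (l.flatMap g) := by
  induction l with
  | nil => exact List.Perm.refl _
  | cons a t ih =>
    simp only [List.flatMap_cons]
    exact (h a (by simp)).append (ih fun x hx => h x (by simp [hx]))

-- partition of pts over a duplicate-free cover of its first components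
theorem flatMap_filter_perm (ds : List Int) (pts : List (Int × Int × Int))
    (hnd : ds.Nodup) (hcov : ∀ p ∈ pts, p.1 ∈ ds) :
    (ds.flatMap (fun d => pts.filter (fun p => p.1 == d))).Perm pts := by
  induction ds generalizing pts with
  | nil =>
    have : pts = [] := List.eq_nil_iff_forall_not_mem.2 fun p hp => by simpa using hcov p hp
    simp [this]
  | cons d t ih =>
    have hd : d ∉ t := (List.nodup_cons.mp hnd).1
    have hnt : t.Nodup := (List.nodup_cons.mp hnd).2
    set pts' := pts.filter (fun p => !(p.1 == d)) with hpts'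
    have hrw : ∀ d' ∈ t, pts.filter (fun p => p.1 == d') = pts'.filter (fun p => p.1 == d') := by
      intro d' hd'
      have hne : d' ≠ d := fun hc => hd (hc ▸ hd')
      rw [hpts', List.filter_filter]
      apply List.filter_congr
      intro p _
      by_cases h : p.1 = d'
      · simp [h, hne]
      · simp [h]
    have ihp : (t.flatMap (fun d' => pts'.filter (fun p => p.1 == d'))).Perm pts' := by
      refine ih pts' hnt ?_
      intro p hp
      have hpm : p ∈ pts := List.mem_of_mem_filter hp
      have hne : ¬ (p.1 == d) = true := by
        have := List.of_mem_filter hp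
        simpa using this
      have := hcov p hpm
      simp only [List.mem_cons] at this
      rcases this with h | h
      · exact absurd (by simp [h]) hne
      · exact h
    rw [List.flatMap_cons, flatMap_congr_mem hrw]
    refine (ihp.append_left _).trans ?_
    simpa [hpts'] using List.filter_append_perm (fun p => p.1 == d) pts

-- the grouped concatenation is pairwise ≤ under the lex key
theorem pairwise_flatMap_groups (ds : List Int) (g : Int → List (Int × Int × Int))
    (hds : ds.Pairwise (· < ·))
    (hfst : ∀ d, ∀ x ∈ g d, x.1 = d)
    (hin : ∀ d, (g d).Pairwise (fun a b => pvLexKey a ≤ pvLexKey b)) :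
    (ds.flatMap g).Pairwise (fun a b => pvLexKey a ≤ pvLexKey b) := by
  induction ds with
  | nil => simp
  | cons d t ih =>
    simp only [List.flatMap_cons]
    rw [List.pairwise_append]
    refine ⟨hin d, ih hds.of_cons, ?_⟩
    intro a ha b hb
    obtain ⟨d', hd', hbd'⟩ := List.mem_flatMap.mp hb
    have hlt : d < d' := (List.pairwise_cons.mp hds).1 d' hd'
    have ha1 : a.1 = d := hfst d a ha
    have hb1 : b.1 = d' := hfst d' b hbd'
    apply le_of_lt
    rw [pvLexKey, pvLexKey, Prod.Lex.lt_iff]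
    left
    simpa [ha1, hb1] using hlt

-- the central fact: B's grouped assembly equals A's single lexicographic sort
theorem grouped_eq_sorted (pts : List (Int × Int × Int)) :
    ((PySem.List.sorted (PySem.Set.ofList (pts.map (fun p => p.1))) (fun x => x)).foldl
      (fun res d =>
        (PySem.List.sorted2 ((pts.filter (fun p => p.1 == d)).map (fun p => (p.2.1, p.2.2)))
            (fun p => p.1) (fun p => p.2)).foldl
          (fun res p => res ++ [(d, p.1, p.2)]) res) [])
    = PySem.List.sorted pts pvLexKey := by
  set ds := PySem.List.sorted (PySem.Set.ofList (pts.map (fun p => p.1))) (fun x => x) with hds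
  set g := fun d => (PySem.List.sorted2 ((pts.filter (fun p => p.1 == d)).map (fun p => (p.2.1, p.2.2)))
      (fun p => p.1) (fun p => p.2)).map (fun p => (d, p.1, p.2)) with hg
  have hfold : (ds.foldl (fun res d =>
      (PySem.List.sorted2 ((pts.filter (fun p => p.1 == d)).map (fun p => (p.2.1, p.2.2)))
          (fun p => p.1) (fun p => p.2)).foldl
        (fun res p => res ++ [(d, p.1, p.2)]) res) []) = ds.flatMap g := by
    rw [show (fun (res : List (Int × Int × Int)) d =>
      (PySem.List.sorted2 ((pts.filter (fun p => p.1 == d)).map (fun p => (p.2.1, p.2.2)))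
          (fun p => p.1) (fun p => p.2)).foldl
        (fun res p => res ++ [(d, p.1, p.2)]) res) = fun res d => res ++ g d from ?_]
    · rw [PySem.List.foldl_append_eq_flatMap]
      simp
    · funext res d
      rw [PySem.List.foldl_append_singleton_eq_map, hg]
  rw [hfold]
  -- group d is a permutation of the points at distance d
  have hgperm : ∀ d, (g d).Perm (pts.filter (fun p => p.1 == d)) := by
    intro d
    have h1 := PySem.List.sorted2_perm ((pts.filter (fun p => p.1 == d)).map (fun p => (p.2.1, p.2.2)))
      (fun p => p.1) (fun p => p.2) false
    have h2 := h1.map (fun p : Int × Int => ((d : Int), p.1, p.2))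
    rw [hg]
    refine h2.trans ?_
    rw [List.map_map]
    have : ∀ p ∈ pts.filter (fun p => p.1 == d),
        ((fun p : Int × Int => ((d : Int), p.1, p.2)) ∘ fun p : Int × Int × Int => (p.2.1, p.2.2)) p = p := by
      intro p hp
      have : p.1 = d := by simpa using List.of_mem_filter hp
      simp [Function.comp, ← this]
    rw [List.map_congr_left this]
    simp
  have hdsnd : ds.Nodup := by
    have := PySem.List.sorted_perm (PySem.Set.ofList (pts.map (fun p => p.1))) (fun x : Int => x) false
    exact this.nodup_iff.mpr (PySem.Set.nodup_ofList _)
  have hdsmem : ∀ p ∈ pts, p.1 ∈ ds := by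
    intro p hp
    have := PySem.List.sorted_perm (PySem.Set.ofList (pts.map (fun p => p.1))) (fun x : Int => x) false
    rw [hds, this.mem_iff, PySem.Set.mem_ofList]
    exact List.mem_map.mpr ⟨p, hp, rfl⟩
  -- the two sides are permutations of each other
  have hperm : (ds.flatMap g).Perm (PySem.List.sorted pts pvLexKey) := by
    refine ((flatMap_perm_congr fun d _ => hgperm d).trans
      (flatMap_filter_perm ds pts hdsnd hdsmem)).trans ?_
    exact (PySem.List.sorted_perm pts pvLexKey false).symm
  -- both sides are pairwise ≤ under the lex key
  have hpair1 : (ds.flatMap g).Pairwise (fun a b => pvLexKey a ≤ pvLexKey b) := by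
    apply pairwise_flatMap_groups ds g
    · rw [hds]
      exact PySem.List.sorted_ofList_pairwise_lt _
    · intro d x hx
      obtain ⟨p, _, hpx⟩ := List.mem_map.mp hx
      rw [← hpx]
    · intro d
      rw [hg]
      have := PySem.List.sorted_pairwise ((pts.filter (fun p => p.1 == d)).map (fun p => (p.2.1, p.2.2)))
        (fun p : Int × Int => toLex (p.1, p.2))
      rw [← sorted2_eq_sorted_toLex] at this
      rw [List.pairwise_map]
      refine this.imp ?_
      intro a b hab
      rw [pvLexKey, pvLexKey, Prod.Lex.le_iff]
      right
      exact ⟨rfl, hab⟩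
  have hpair2 : (PySem.List.sorted pts pvLexKey).Pairwise (fun a b => pvLexKey a ≤ pvLexKey b) :=
    PySem.List.sorted_pairwise pts pvLexKey
  exact PySem.List.eq_of_perm_of_pairwise_le_of_injective pvLexKey pvLexKey_injective hperm hpair1 hpair2

-- ===== VERDICT (by name: the statement is the Claim_ definition above) =====
theorem find_nearest_light_point_spec : Claim_equal_find_nearest_light_point := by
  intro img width height target num_target _ _
  unfold Spec_find_nearest_light_point
  simp only [find_nearest_light_point, find_nearest_light_point_alt]
  rw [grouped_eq_sorted]
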